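-- pv_equiv track=rewrite | github.com/chaitanyasayee/DSA_Practice | Day_100/Partition Array Such That Maximum Difference Is K/sol.py | partitionArray
-- ===== SOURCE A (Python) =====
-- from typing import List
--
-- def partitionArray(nums: List[int], k: int) -> int:
--     nums.sort()
--     ans = 1
--     start = nums[0]
--     for num in nums:
--         if num - start > k:
--             ans +=1
--             start = num
--     return ans
-- ===== SOURCE B (Python) =====
-- from bisect import bisect_right
--
-- def partitionArray(nums, k):
--     nums.sort()
--     start = nums[0]
--     ans = 1
--     i = bisect_right(nums, start + k)
--     while i < len(nums):
--         ans += 1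
--         start = nums[i]
--         i = bisect_right(nums, start + k, i + 1)
--     return ans
-- ===== Notes on version B (the rewrite author's own statement) =====
-- stated objective: alternative
-- what changed: Replaces A's element-by-element greedy counting pass over the sorted array with a bisect_right-driven loop that jumps directly from one partition boundary to the next, iterating once per partition instead of once per element.
import Mathlib
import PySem

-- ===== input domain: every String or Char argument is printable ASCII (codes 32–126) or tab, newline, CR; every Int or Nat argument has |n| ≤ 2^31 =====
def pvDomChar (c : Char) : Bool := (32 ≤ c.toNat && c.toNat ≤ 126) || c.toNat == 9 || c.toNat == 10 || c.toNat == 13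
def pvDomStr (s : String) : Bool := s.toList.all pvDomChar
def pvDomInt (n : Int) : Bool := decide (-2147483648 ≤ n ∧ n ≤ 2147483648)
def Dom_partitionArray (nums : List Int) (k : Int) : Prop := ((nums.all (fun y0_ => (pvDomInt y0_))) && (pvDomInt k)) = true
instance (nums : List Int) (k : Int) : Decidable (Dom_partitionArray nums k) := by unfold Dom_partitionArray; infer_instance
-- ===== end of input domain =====

-- B replaces A's element-by-element greedy scan by bisect_right jumps from one partition
-- boundary to the next (objective: alternative decomposition).
-- Both A and B sort `nums` in place; the equivalence proved here is about the return value.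

-- ===== PORT A =====
def partitionArray (nums : List Int) (k : Int) : Int :=
  let s := PySem.List.sorted nums (fun x => x) false
  match s with
  | [] => 1  -- unreachable inside Pre_: Python raises IndexError on nums[0]
  | h :: _ =>
    (s.foldl (fun (st : Int × Int) num =>
        if num - st.2 > k then (st.1 + 1, num) else st) (1, h)).1

-- ===== PORT B =====
-- bisect.bisect_right(xs, x, lo): PySem.List.bisectRight applied to the part of xs from
-- index lo on (exact on the sorted lists B calls it with).
def bisectRightFrom (xs : List Int) (x : Int) (lo : Nat) : Nat :=
  lo + PySem.List.bisectRight (xs.drop lo) x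

-- the while loop of B: i is the first index of the current partition's successor region
def altLoop (xs : List Int) (k : Int) (i : Nat) (ans : Int) : Int :=
  if h : i < xs.length then
    let start := xs.getD i 0   -- nums[i], in range by h
    altLoop xs k (bisectRightFrom xs (start + k) (i + 1)) (ans + 1)
  else ans
termination_by xs.length - i
decreasing_by
  have : i + 1 ≤ bisectRightFrom xs (xs.getD i 0 + k) (i + 1) := Nat.le_add_right _ _
  omega

def partitionArray_alt (nums : List Int) (k : Int) : Int :=
  let s := PySem.List.sorted nums (fun x => x) false
  match s with
  | [] => 1  -- unreachable inside Pre_: Python raises IndexError on nums[0]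
  | h :: _ => altLoop s k (bisectRightFrom s (h + k) 0) 1

-- ===== PRECONDITION & SPEC =====
-- Pre_ excludes only the empty list, on which both Pythons raise IndexError at nums[0].
def Pre_partitionArray (nums : List Int) (k : Int) : Prop := nums ≠ []
instance (nums : List Int) (k : Int) : Decidable (Pre_partitionArray nums k) := by
  unfold Pre_partitionArray; infer_instance
def pvWitness_partitionArray : List Int × Int := ([3, 1, 7], 2)

def Spec_partitionArray (nums : List Int) (k : Int) (out : Int) : Prop := out = partitionArray_alt nums k
instance (nums : List Int) (k : Int) (out : Int) : Decidable (Spec_partitionArray nums k out) := by unfold Spec_partitionArray; infer_instance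

-- ===== CLAIM (what is proved, stated in full; the proofs are below) =====
def Claim_equal_partitionArray : Prop := ∀ (nums : List Int) (k : Int), Dom_partitionArray nums k → Pre_partitionArray nums k → Spec_partitionArray nums k (partitionArray nums k)

-- ===== LEMMAS AND PROOFS =====

-- model of B's jumping loop as recursion on the remaining suffix
def jumpL (k : Int) (t : List Int) (ans : Int) : Int :=
  if h : t = [] then ans
  else jumpL k ((t.tail).dropWhile (fun y => decide (y ≤ t.head h + k))) (ans + 1)
termination_by t.length
decreasing_by
  have := List.length_dropWhile_le (fun y => decide (y ≤ t.head h + k)) t.tail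
  have ht : t.tail.length < t.length := by
    cases t with
    | nil => exact absurd rfl h
    | cons a r => simp
  omega

theorem jumpL_nil (k : Int) (ans : Int) : jumpL k [] ans = ans := by
  rw [jumpL]; simp

theorem jumpL_cons (k x : Int) (r : List Int) (ans : Int) :
    jumpL k (x :: r) ans = jumpL k (r.dropWhile (fun y => decide (y ≤ x + k))) (ans + 1) := by
  conv_lhs => rw [jumpL]
  rw [dif_neg (List.cons_ne_nil x r)]
  simp only [List.head_cons, List.tail_cons]
  rfl

theorem drop_length_takeWhile (p : Int → Bool) (l : List Int) :
    l.drop ((l.takeWhile p).length) = l.dropWhile p := by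
  induction l with
  | nil => rfl
  | cons x r ih =>
    by_cases h : p x
    · simp [h, ih]
    · simp [h]

-- on a ≤-sorted list, bisectRight is the length of the run of elements ≤ x
theorem takeWhile_getElem_true (p : Int → Bool) (l : List Int) (j : Nat)
    (hj : j < (l.takeWhile p).length) (hl : j < l.length) : p l[j] = true := by
  have hpe := (List.takeWhile_prefix (l := l) p).getElem hj
  have hm : (l.takeWhile p)[j] ∈ l.takeWhile p := List.getElem_mem hj
  have hp := List.mem_takeWhile_imp hm
  rw [hpe] at hp; exact hp

theorem takeWhile_getElem_false (p : Int → Bool) (l : List Int)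
    (hl : (l.takeWhile p).length < l.length) : p (l[(l.takeWhile p).length]'hl) = false := by
  induction l with
  | nil => simp at hl
  | cons x r ih =>
    by_cases h : p x
    · simp only [List.takeWhile_cons, h, if_true] at hl ⊢
      simpa using ih (by simpa using hl)
    · simp [h]

theorem bisectRight_eq_takeWhile (l : List Int) (x : Int)
    (hs : l.Pairwise (fun a b => a ≤ b)) :
    PySem.List.bisectRight l x = (l.takeWhile (fun y => decide (y ≤ x))).length := by
  obtain ⟨hle, hlt, hgt⟩ := PySem.List.bisectRight_spec l x hs
  have htle : (l.takeWhile (fun y => decide (y ≤ x))).length ≤ l.length := by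
    exact List.IsPrefix.length_le (List.takeWhile_prefix (l := l) (fun y => decide (y ≤ x)))
  rcases Nat.lt_trichotomy (PySem.List.bisectRight l x)
      ((l.takeWhile (fun y => decide (y ≤ x))).length) with hlt' | he | hgt'
  · -- bisect < takeWhile length : l[b] ≤ x by takeWhile, but x < l[b] by spec
    have hbl : PySem.List.bisectRight l x < l.length := by omega
    have h1 := takeWhile_getElem_true (fun y => decide (y ≤ x)) l _ hlt' hbl
    have h2 := hgt _ hbl (le_refl _)
    simp at h1; omega
  · exact he
  · -- takeWhile length < bisect : l[t] ≤ x by spec, but takeWhile stopped at t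
    have htl : (l.takeWhile (fun y => decide (y ≤ x))).length < l.length := by omega
    have h1 := hlt _ htl hgt'
    have h2 := takeWhile_getElem_false (fun y => decide (y ≤ x)) l htl
    simp at h2; omega

theorem drop_bisectRight (l : List Int) (x : Int) (hs : l.Pairwise (fun a b => a ≤ b)) :
    l.drop (PySem.List.bisectRight l x) = l.dropWhile (fun y => decide (y ≤ x)) := by
  rw [bisectRight_eq_takeWhile l x hs, drop_length_takeWhile]

theorem altLoop_eq_jumpL (xs : List Int) (k : Int)
    (hs : xs.Pairwise (fun a b => a ≤ b)) (i : Nat) (ans : Int) :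
    altLoop xs k i ans = jumpL k (xs.drop i) ans := by
  by_cases h : i < xs.length
  · rw [altLoop]
    simp only [h, dif_pos]
    have hdrop : xs.drop i = xs[i] :: xs.drop (i + 1) := List.drop_eq_getElem_cons h
    have hgd : xs.getD i 0 = xs[i] := by
      simp [List.getD, List.getElem?_eq_getElem h]
    rw [altLoop_eq_jumpL xs k hs _ (ans + 1)]
    rw [hdrop, jumpL_cons, hgd]
    congr 1
    rw [bisectRightFrom, ← List.drop_drop,
      drop_bisectRight _ _ (hs.sublist (List.drop_sublist (i + 1) xs))]
  · rw [altLoop]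
    simp only [h, dif_neg, not_false_iff]
    rw [List.drop_eq_nil_of_le (by omega), jumpL_nil]
termination_by xs.length - i
decreasing_by
  have : i + 1 ≤ bisectRightFrom xs (xs.getD i 0 + k) (i + 1) := Nat.le_add_right _ _
  omega

-- A's fold equals a jump over the elements past the current partition (no sortedness needed)
theorem fold_eq_jumpL (k : Int) (t : List Int) (ans start : Int) :
    (t.foldl (fun (st : Int × Int) num =>
        if num - st.2 > k then (st.1 + 1, num) else st) (ans, start)).1
      = jumpL k (t.dropWhile (fun y => decide (y ≤ start + k))) ans := by
  induction t generalizing ans start with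
  | nil => simp [jumpL_nil]
  | cons x r ih =>
    by_cases h : x - start > k
    · have hx : decide (x ≤ start + k) = false := by simp; omega
      simp only [List.foldl_cons, if_pos h, List.dropWhile_cons, hx, Bool.false_eq_true,
        if_false]
      rw [jumpL_cons, ih]
    · have hx : decide (x ≤ start + k) = true := by simp; omega
      simp only [List.foldl_cons, if_neg h, List.dropWhile_cons, hx, if_true]
      exact ih ans start

-- ===== VERDICT (by name: the statement is the Claim_ definition above) =====
theorem partitionArray_spec : Claim_equal_partitionArray := by
  intro nums k _ _
  unfold Spec_partitionArray partitionArray partitionArray_alt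
  have hs : (PySem.List.sorted nums (fun x => x) false).Pairwise (fun a b => a ≤ b) :=
    PySem.List.sorted_pairwise nums (fun x => x)
  cases hsl : PySem.List.sorted nums (fun x => x) false with
  | nil => rfl
  | cons h t =>
    rw [hsl] at hs
    simp only
    rw [fold_eq_jumpL, altLoop_eq_jumpL _ _ hs, bisectRightFrom, Nat.zero_add, List.drop_zero,
      drop_bisectRight _ _ hs]
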